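-- pv_equiv track=rewrite | github.com/chunwangpro/CSP_Graph | PGM_deprecated.py | Assign_column_variable
-- ===== SOURCE A (Python) =====
-- def Assign_column_variable(column_interval):
--     """Generate sequential variable index for each column interval.
--
--     Returns:
--     column_to_variable: dict, key is column index, value is a list of variable index, from 0 to total_intervals - 1, where total_intervals = sum(column_interval_number)
--
--     column_to_variable = {
--         0: [0],
--         1: [1, 2, 3, 4],
--         2: [5, 6, 7, 8],
--         3: [9],
--         ...,
--     }
--     """
--     column_to_variable = {}
--     total_intervals = 0
--     for k, v in column_interval.items():
--         count = len(v)
--         column_to_variable[k] = [total_intervals + i for i in range(count)]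
--         total_intervals += count
--     return column_to_variable
-- ===== SOURCE B (Python) =====
-- def Assign_column_variable(column_interval):
--     # Different algorithm: flatten the dict to one 'owner' entry per interval,
--     # then bucket the global enumeration indices by owner key (no running total).
--     owners = [k for k, v in column_interval.items() for _ in v]
--     column_to_variable = {k: [] for k in column_interval}
--     for idx, k in enumerate(owners):
--         column_to_variable[k].append(idx)
--     return column_to_variable
-- ===== Notes on version B (the rewrite author's own statement) =====
-- stated objective: alternative
-- what changed: Replaces A's single pass with a running total by a flatten-and-group algorithm: build a flat 'owners' list with one entry per interval, pre-seed every key with an empty bucket, and distribute the global enumerate indices into the buckets by key.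
import Mathlib
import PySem

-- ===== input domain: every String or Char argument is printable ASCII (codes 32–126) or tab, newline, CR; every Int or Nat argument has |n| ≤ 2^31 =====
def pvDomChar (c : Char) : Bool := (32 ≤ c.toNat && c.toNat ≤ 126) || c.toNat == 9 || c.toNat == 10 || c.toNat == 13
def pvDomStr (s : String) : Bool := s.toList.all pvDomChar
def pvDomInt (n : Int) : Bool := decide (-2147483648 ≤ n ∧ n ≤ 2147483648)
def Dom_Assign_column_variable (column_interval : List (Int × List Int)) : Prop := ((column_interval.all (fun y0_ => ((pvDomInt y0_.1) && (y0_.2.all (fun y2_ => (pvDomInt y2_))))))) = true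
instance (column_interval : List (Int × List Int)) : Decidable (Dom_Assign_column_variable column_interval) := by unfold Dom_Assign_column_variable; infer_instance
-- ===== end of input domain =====

-- B replaces A's running-total pass by a flatten-and-group algorithm (alternative structure, same cost); return value only.


-- ===== PORT A =====
-- for k, v in column_interval.items(): column_to_variable[k] = [total_intervals + i for i in range(count)]; total_intervals += count
def Assign_column_variable (column_interval : List (Int × List Int)) : List (Int × List Int) :=
  ((column_interval.foldl
      (fun (st : PySem.Dict Int (List Int) × Int) kv =>
        let count : Int := kv.2.length
        (st.1.insert kv.1 ((PySem.List.pyRange 0 count 1).map (fun i => st.2 + i)), st.2 + count))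
      (PySem.Dict.empty, 0)).1).items

-- ===== PORT B =====
-- owners = [k for k, v in column_interval.items() for _ in v]
def pvOwners (column_interval : List (Int × List Int)) : List Int :=
  column_interval.flatMap (fun kv => kv.2.map (fun _ => kv.1))

-- {k: [] for k in column_interval}, then: for idx, k in enumerate(owners): column_to_variable[k].append(idx)
-- (the append is ported as Dict.modify with default []; every owner key is pre-seeded, so the default is never used)
def Assign_column_variable_alt (column_interval : List (Int × List Int)) : List (Int × List Int) :=
  let owners : List Int := pvOwners column_interval
  let buckets0 : PySem.Dict Int (List Int) :=
    column_interval.foldl (fun d kv => d.insert kv.1 ([] : List Int)) PySem.Dict.empty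
  let buckets :=
    (PySem.List.enumerate owners 0).foldl
      (fun d p => d.modify p.2 [] (fun l => l ++ [p.1])) buckets0
  buckets.items

-- ===== PRECONDITION & SPEC =====
-- Pre_ excludes association lists with duplicate keys: they do not denote a Python dict (dict construction
-- collapses duplicates), so any list-level behaviour of the ports there is an artefact of the representation.
def Pre_Assign_column_variable (column_interval : List (Int × List Int)) : Prop :=
  (column_interval.map Prod.fst).Nodup
instance (column_interval : List (Int × List Int)) : Decidable (Pre_Assign_column_variable column_interval) := by unfold Pre_Assign_column_variable; infer_instance

def pvWitness_Assign_column_variable : (List (Int × List Int)) := [(0, [1]), (1, [2, 3, 4]), (2, [])]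

def Spec_Assign_column_variable (column_interval : List (Int × List Int)) (out : List (Int × List Int)) : Prop := out = Assign_column_variable_alt column_interval
instance (column_interval : List (Int × List Int)) (out : List (Int × List Int)) : Decidable (Spec_Assign_column_variable column_interval out) := by unfold Spec_Assign_column_variable; infer_instance

-- ===== CLAIM (what is proved, stated in full; the proofs are below) =====
def Claim_equal_Assign_column_variable : Prop := ∀ (column_interval : List (Int × List Int)), Dom_Assign_column_variable column_interval → Pre_Assign_column_variable column_interval → Spec_Assign_column_variable column_interval (Assign_column_variable column_interval)

-- ===== LEMMAS AND PROOFS =====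

/-- The common description of both results: one pair per input pair, with consecutive index ranges. -/
def pvSpec : List (Int × List Int) → Int → List (Int × List Int)
  | [], _ => []
  | kv :: rest, t =>
      (kv.1, PySem.List.pyRange t (t + kv.2.length) 1) :: pvSpec rest (t + (kv.2.length : Int))

lemma pvShift (t : Int) (n : Nat) :
    (PySem.List.pyRange 0 (n : Int) 1).map (fun i => t + i) = PySem.List.pyRange t (t + n) 1 := by
  simp [PySem.List.pyRange_one]

/-- A's fold, started on a dict containing none of the (distinct) keys, appends `pvSpec`. -/
lemma pvA_items (ci : List (Int × List Int)) (d : PySem.Dict Int (List Int)) (t : Int)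
    (hnd : (ci.map Prod.fst).Nodup) (hfresh : ∀ k ∈ ci.map Prod.fst, d.contains k = false) :
    ((ci.foldl
        (fun (st : PySem.Dict Int (List Int) × Int) kv =>
          let count : Int := kv.2.length
          (st.1.insert kv.1 ((PySem.List.pyRange 0 count 1).map (fun i => st.2 + i)), st.2 + count))
        (d, t)).1).items = d.items ++ pvSpec ci t := by
  induction ci generalizing d t with
  | nil => simp [pvSpec]
  | cons kv rest ih =>
      simp only [List.map_cons, List.nodup_cons] at hnd
      have hd : d.contains kv.1 = false := hfresh kv.1 (by simp)
      simp only [List.foldl_cons, pvSpec]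
      rw [pvShift t kv.2.length]
      rw [ih (d.insert kv.1 (PySem.List.pyRange t (t + kv.2.length) 1)) (t + kv.2.length) hnd.2
          (by
            intro k hk
            rw [PySem.Dict.contains_insert]
            have hne : k ≠ kv.1 := by
              rintro rfl; exact hnd.1 hk
            simp [hne, hfresh k (by simp [hk])])]
      rw [PySem.Dict.items_insert_of_not_contains d _ hd]
      simp

/-- The indices that B's grouping loop assigns to key `k`, flattened out of `enumerate(os, t)`. -/
def pvIdxOf (os : List Int) (t : Int) (k : Int) : List Int :=
  (((PySem.List.enumerate os t).map Prod.swap).filter (fun p => p.1 == k)).map (fun x => x.2)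

lemma pvOwners_cons (kv : Int × List Int) (rest : List (Int × List Int)) :
    pvOwners (kv :: rest) = List.replicate kv.2.length kv.1 ++ pvOwners rest := by
  simp [pvOwners, List.flatMap_cons, List.map_const']

lemma pvIdx_block (n : Nat) (k' k t : Int) :
    pvIdxOf (List.replicate n k') t k
      = if k = k' then PySem.List.pyRange t (t + n) 1 else [] := by
  induction n generalizing t with
  | zero =>
      simp [pvIdxOf, PySem.List.enumerate_nil]
  | succ n ih =>
      by_cases hk : k = k'
      · subst hk
        simp only [pvIdxOf] at ih ⊢
        rw [List.replicate_succ, PySem.List.enumerate_cons]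
        simp only [List.map_cons, Prod.swap_prod_mk, List.filter_cons, beq_self_eq_true,
          if_true, List.map_cons]
        rw [ih (t + 1)]
        simp only [if_true]
        have harith : t + ((n + 1 : Nat) : Int) = (t + 1) + (n : Int) := by push_cast; ring
        rw [harith]
        conv_rhs => rw [PySem.List.pyRange_one_cons (show t < t + 1 + (n : Int) by omega)]
      · have hb : ((k' : Int) == k) = false := by
          simp [beq_eq_false_iff_ne]; omega
        simp only [pvIdxOf] at ih ⊢
        simp [List.replicate_succ, PySem.List.enumerate_cons, hb, ih (t + 1), hk]

lemma pvIdx_append (xs ys : List Int) (t k : Int) :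
    pvIdxOf (xs ++ ys) t k = pvIdxOf xs t k ++ pvIdxOf ys (t + xs.length) k := by
  simp [pvIdxOf, PySem.List.enumerate_append, List.filter_append]

lemma pvIdx_not_mem (ci : List (Int × List Int)) (t k : Int)
    (h : k ∉ ci.map Prod.fst) : pvIdxOf (pvOwners ci) t k = [] := by
  induction ci generalizing t with
  | nil => simp [pvOwners, pvIdxOf, PySem.List.enumerate_nil]
  | cons kv rest ih =>
      simp only [List.map_cons, List.mem_cons, not_or] at h
      rw [pvOwners_cons, pvIdx_append, pvIdx_block, if_neg h.1, List.nil_append,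
        List.length_replicate]
      exact ih _ h.2

/-- Grouping a flat enumeration by (distinct) owner keys yields exactly `pvSpec`. -/
lemma pvB_main (ci : List (Int × List Int)) (t : Int) (hnd : (ci.map Prod.fst).Nodup) :
    (ci.map Prod.fst).map (fun k => (k, pvIdxOf (pvOwners ci) t k)) = pvSpec ci t := by
  induction ci generalizing t with
  | nil => simp [pvSpec]
  | cons kv rest ih =>
      simp only [List.map_cons, List.nodup_cons] at hnd
      simp only [List.map_cons, pvSpec]
      congr 1
      · -- head: its own block contributes the range, the tail blocks contribute nothing
        rw [pvOwners_cons, pvIdx_append, pvIdx_block, if_pos rfl, List.length_replicate,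
          pvIdx_not_mem rest _ kv.1 hnd.1, List.append_nil]
      · -- tail: the head block is filtered away for every other key
        rw [List.map_congr_left (fun k hk => by
          have hne : k ≠ kv.1 := by rintro rfl; exact hnd.1 hk
          show (k, pvIdxOf (pvOwners (kv :: rest)) t k)
              = (k, pvIdxOf (pvOwners rest) (t + kv.2.length) k)
          rw [pvOwners_cons, pvIdx_append, pvIdx_block, if_neg hne, List.nil_append,
            List.length_replicate])]
        exact ih (t + kv.2.length) hnd.2

-- ===== VERDICT (by name: the statement is the Claim_ definition above) =====
theorem Assign_column_variable_spec : Claim_equal_Assign_column_variable := by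
  intro ci _ hpre
  unfold Spec_Assign_column_variable Assign_column_variable Assign_column_variable_alt
  -- A's side
  rw [pvA_items ci PySem.Dict.empty 0 hpre (by intro k _; exact PySem.Dict.contains_empty k)]
  -- B's side: the seeded buckets
  have h0 := PySem.Dict.items_foldl_insert_fresh ci (fun kv => kv.1) (fun _ => ([] : List Int))
      PySem.Dict.empty (by intro a _; exact PySem.Dict.contains_empty a.1) hpre
  set d0 : PySem.Dict Int (List Int) :=
    ci.foldl (fun d kv => d.insert kv.1 ([] : List Int)) PySem.Dict.empty with hd0
  have hkeys0 : d0.keys = ci.map Prod.fst := by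
    show d0.items.map Prod.fst = ci.map Prod.fst
    rw [h0]
    show (([] : List (Int × List Int)) ++ ci.map (fun a => (a.1, ([] : List Int)))).map Prod.fst
        = ci.map Prod.fst
    simp
  set dB : PySem.Dict Int (List Int) :=
    (PySem.List.enumerate (pvOwners ci) 0).foldl
      (fun d p => d.modify p.2 [] (fun l => l ++ [p.1])) d0 with hdB
  have howners : ∀ y ∈ pvOwners ci, y ∈ d0.keys := by
    intro y hy
    rw [hkeys0]
    rcases List.mem_flatMap.mp hy with ⟨kv, hkv, hy'⟩
    rcases List.mem_map.mp hy' with ⟨_, _, rfl⟩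
    exact List.mem_map.mpr ⟨kv, hkv, rfl⟩
  -- the grouping loop does not change the key list
  have hkeysB : dB.keys = ci.map Prod.fst := by
    rw [hdB, PySem.Dict.keys_foldl_modify_key (PySem.List.enumerate (pvOwners ci) 0)
        (fun p => p.2) ([] : List Int) (fun _ p => fun l => l ++ [p.1]) d0]
    rw [PySem.List.map_snd_enumerate]
    rw [PySem.Set.update_eq_append_filter]
    rw [List.filter_eq_nil_iff.mpr (by
      intro y hy
      have hmem : y ∈ pvOwners ci := (PySem.Set.mem_ofList _ y).mp hy
      simp only [Bool.not_eq_eq_eq_not, Bool.not_true]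
      simpa [PySem.Set.contains_iff] using howners y hmem)]
    simp [hkeys0]
  have hndB : dB.keys.Nodup := by rw [hkeysB]; exact hpre
  -- per-key contents of the final buckets
  have hgetD : ∀ k, dB.getD k [] = d0.getD k [] ++ pvIdxOf (pvOwners ci) 0 k := by
    intro k
    have hfold : dB = ((PySem.List.enumerate (pvOwners ci) 0).map Prod.swap).foldl
        (fun d p => d.modify p.1 [] (fun l => l ++ [p.2])) d0 := by
      rw [hdB, List.foldl_map]
      simp only [Prod.fst_swap, Prod.snd_swap]
    rw [hfold, pvIdxOf]
    exact PySem.Dict.getD_foldl_modify_append _ d0 k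
  have hgetD0 : ∀ k ∈ ci.map Prod.fst, d0.getD k [] = [] := by
    intro k hk
    rcases List.mem_map.mp hk with ⟨kv, hkv, rfl⟩
    refine PySem.Dict.getD_of_mem_items d0 ?_ (by rw [hkeys0]; exact hpre) []
    rw [h0]
    exact List.mem_append_right _ (List.mem_map.mpr ⟨kv, hkv, rfl⟩)
  -- assemble
  rw [PySem.Dict.items_eq_map_keys dB hndB ([] : List Int), hkeysB]
  rw [List.map_congr_left (fun k hk => by
    show (k, dB.getD k []) = (k, pvIdxOf (pvOwners ci) 0 k)
    rw [hgetD k, hgetD0 k hk, List.nil_append])]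
  rw [pvB_main ci 0 hpre]
  show ([] : List (Int × List Int)) ++ pvSpec ci 0 = pvSpec ci 0
  exact List.nil_append _
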